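-- pv_equiv track=rewrite | github.com/norrietaylor/agentry | src/agentry/runners/dns_proxy.py | is_domain_allowed
-- ===== SOURCE A (Python) =====
-- def is_domain_allowed(domain: str, allow_set: set[str]) -> bool:
--     """Check whether *domain* matches any entry in *allow_set*.
--
--     Matching rules:
--     - Exact match (case-insensitive).
--     - Subdomain match: ``sub.example.com`` matches if ``example.com`` is in
--       the allow set.
--
--     Args:
--         domain: The domain name to check (may include trailing dot).
--         allow_set: Set of normalised allowed domain names.
--
--     Returns:
--         ``True`` if the domain is allowed, ``False`` otherwise.
--     """
--     normalised = domain.lower().rstrip(".")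
--     if not normalised:
--         return False
--
--     # Exact match.
--     if normalised in allow_set:
--         return True
--
--     # Subdomain match: walk up the domain hierarchy.
--     parts = normalised.split(".")
--     for i in range(1, len(parts)):
--         parent = ".".join(parts[i:])
--         if parent in allow_set:
--             return True
--
--     return False
-- ===== SOURCE B (Python) =====
-- def is_domain_allowed(domain: str, allow_set: set[str]) -> bool:
--     """Scan the allow set once, testing exact or dot-boundary suffix match."""
--     normalised = domain.lower().rstrip(".")
--     if not normalised:
--         return False
--     for allowed in allow_set:
--         if normalised == allowed or normalised.endswith("." + allowed):
--             return True
--     return False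
-- ===== Notes on version B (the rewrite author's own statement) =====
-- stated objective: alternative
-- what changed: Instead of generating every parent suffix of the domain and looking each one up in the allow set, B scans the allow set once and tests each entry for exact equality or a dot-boundary suffix match ('.' + allowed).
import Mathlib
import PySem

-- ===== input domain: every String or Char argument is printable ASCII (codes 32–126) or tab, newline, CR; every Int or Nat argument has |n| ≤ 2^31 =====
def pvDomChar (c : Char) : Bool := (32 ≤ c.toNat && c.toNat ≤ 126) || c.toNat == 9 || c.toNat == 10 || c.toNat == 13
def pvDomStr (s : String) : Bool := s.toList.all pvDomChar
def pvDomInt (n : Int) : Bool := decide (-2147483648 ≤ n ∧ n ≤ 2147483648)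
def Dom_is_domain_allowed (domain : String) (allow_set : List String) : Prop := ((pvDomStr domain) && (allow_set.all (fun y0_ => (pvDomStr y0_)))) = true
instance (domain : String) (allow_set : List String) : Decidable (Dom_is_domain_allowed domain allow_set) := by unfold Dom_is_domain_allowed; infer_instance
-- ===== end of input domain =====

-- B replaces A's walk up the parent suffixes (with allow-set lookups) by a single scan over the
-- allow set testing exact or dot-boundary suffix match; alternative decomposition, same value everywhere.


-- ===== PORT A =====
def is_domain_allowed (domain : String) (allow_set : List String) : Bool :=
  let allowL : List (List Char) := allow_set.map String.toList
  -- normalised = domain.lower().rstrip(".")  (rstrip with a char argument has no PySem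
  -- primitive: exact hand port, dropping the trailing '.' characters)
  let normalised : List Char :=
    ((PySem.Chars.lower domain.toList).reverse.dropWhile (· == '.')).reverse
  if normalised = [] then false
  else if allowL.contains normalised then true
  else
    let parts := PySem.Chars.splitOn normalised ['.']
    (PySem.List.pyRange 1 (parts.length : Int) 1).any (fun i =>
      allowL.contains (PySem.Chars.join ['.'] (PySem.List.slice parts (some i) none)))

-- ===== PORT B =====
def is_domain_allowed_alt (domain : String) (allow_set : List String) : Bool :=
  -- normalised = domain.lower().rstrip(".")  (exact hand port, as in port A)
  let normalised : List Char :=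
    ((PySem.Chars.lower domain.toList).reverse.dropWhile (· == '.')).reverse
  if normalised = [] then false
  else allow_set.any (fun allowed =>
    normalised == allowed.toList || PySem.Chars.endswith normalised ('.' :: allowed.toList))

-- ===== PRECONDITION & SPEC =====
def Spec_is_domain_allowed (domain : String) (allow_set : List String) (out : Bool) : Prop := out = is_domain_allowed_alt domain allow_set
instance (domain : String) (allow_set : List String) (out : Bool) : Decidable (Spec_is_domain_allowed domain allow_set out) := by unfold Spec_is_domain_allowed; infer_instance

-- ===== CLAIM (what is proved, stated in full; the proofs are below) =====
def Claim_equal_is_domain_allowed : Prop := ∀ (domain : String) (allow_set : List String), Dom_is_domain_allowed domain allow_set → Spec_is_domain_allowed domain allow_set (is_domain_allowed domain allow_set)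

-- ===== LEMMAS AND PROOFS =====

-- a suffix of `p ++ s` is a suffix of `s` or `u ++ s` for a nonempty suffix `u` of `p`
theorem suffix_append_cases {α : Type} (p : List α) (l s : List α) (h : l <:+ p ++ s) :
    l <:+ s ∨ ∃ u, u ≠ [] ∧ u <:+ p ∧ l = u ++ s := by
  induction p with
  | nil => exact Or.inl h
  | cons c p' ih =>
    rcases List.suffix_cons_iff.mp h with h1 | h2
    · exact Or.inr ⟨c :: p', by simp, List.suffix_refl _, by simpa using h1⟩
    · rcases ih h2 with h3 | ⟨u, hu, hup, hl⟩
      · exact Or.inl h3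
      · exact Or.inr ⟨u, hu, hup.trans (List.suffix_cons c p'), hl⟩

-- PySem's fuel-based splitOn with a one-character separator, characterised by core's splitOnP
theorem pySplitOn_go_singleton (x : Char) (fuel : Nat) :
    ∀ (l cur : List Char) (accs : List (List Char)), l.length ≤ fuel →
      PySem.Chars.splitOn.go [x] fuel l cur accs =
        accs.reverse ++ (l.splitOnP (· == x)).modifyHead (cur.reverse ++ ·) := by
  induction fuel with
  | zero =>
    intro l cur accs h
    have hl : l = [] := by cases l <;> simp_all
    subst hl
    simp [PySem.Chars.splitOn.go, List.splitOnP_nil]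
  | succ n ih =>
    intro l cur accs h
    cases l with
    | nil => simp [PySem.Chars.splitOn.go, List.splitOnP_nil]
    | cons c rest =>
      rw [PySem.Chars.splitOn.go]
      rw [List.splitOnP_cons]
      by_cases hc : c = x
      · subst hc
        simp only [List.isPrefixOf, beq_self_eq_true, Bool.and_eq_true, true_and, if_pos,
          List.length_cons, List.length_nil, Nat.zero_add, List.drop_succ_cons, List.drop_zero]
        rw [ih rest [] (cur.reverse :: accs) (by simpa using Nat.le_of_succ_le_succ h)]
        have hne := List.splitOnP_ne_nil (p := fun y => y == c) rest
        cases hsp : rest.splitOnP (fun y => y == c) with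
        | nil => exact absurd hsp hne
        | cons hd tl => simp
      · have hpre : ([x].isPrefixOf (c :: rest)) = false := by
          simp [List.isPrefixOf]; exact fun h' => hc h'.symm
        rw [hpre]
        simp only [Bool.false_eq_true, if_false]
        rw [ih rest (c :: cur) accs (by simpa using Nat.le_of_succ_le_succ h)]
        have hcx : (c == x) = false := by simp [hc]
        rw [hcx]
        simp only [Bool.false_eq_true, if_false]
        have hne := List.splitOnP_ne_nil (p := fun y => y == x) rest
        cases hsp : rest.splitOnP (fun y => y == x) with
        | nil => exact absurd hsp hne
        | cons hd tl => simp

-- consequence: PySem's splitOn with a one-character separator is core's List.splitOn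
theorem pySplitOn_singleton (x : Char) (s : List Char) :
    PySem.Chars.splitOn s [x] = s.splitOn x := by
  rw [PySem.Chars.splitOn, pySplitOn_go_singleton x (s.length + 1) s [] [] (by omega)]
  have hne := List.splitOnP_ne_nil (p := fun y => y == x) s
  cases hsp : s.splitOnP (fun y => y == x) with
  | nil => exact absurd hsp hne
  | cons hd tl => simp [List.splitOn, hsp]

-- no part produced by s.splitOn x contains x
theorem not_mem_of_mem_splitOn (x : Char) (s : List Char) :
    ∀ p ∈ s.splitOn x, x ∉ p := by
  show ∀ p ∈ s.splitOnP (· == x), x ∉ p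
  induction s with
  | nil => intro p hp; rw [List.splitOnP_nil] at hp; simp at hp; simp [hp]
  | cons c s' ih =>
    intro p hp
    rw [List.splitOnP_cons] at hp
    by_cases hc : c = x
    · simp [hc] at hp
      rcases hp with h | h
      · simp [h]
      · exact ih p h
    · have hcx : (c == x) = false := by simp [hc]
      rw [hcx] at hp
      simp only [Bool.false_eq_true, if_false] at hp
      have hne := List.splitOnP_ne_nil (p := fun y => y == x) s'
      cases hsp : s'.splitOnP (fun y => y == x) with
      | nil => exact absurd hsp hne
      | cons hd tl =>
        rw [hsp] at hp
        simp only [List.modifyHead, List.mem_cons] at hp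
        rcases hp with h | h
        · subst h
          intro hmem
          rcases List.mem_cons.mp hmem with h1 | h2
          · exact hc h1.symm
          · exact ih hd (by rw [hsp]; simp) h2
        · exact ih p (by rw [hsp]; simp [h])

-- key lemma: the x-boundary suffixes of an x-join of x-free parts are exactly
-- the joins of the proper tails of the part list
theorem suffix_join_iff (x : Char) (a : List Char) :
    ∀ (ls : List (List Char)), ls ≠ [] → (∀ p ∈ ls, x ∉ p) →
      ((x :: a) <:+ PySem.Chars.join [x] ls ↔
        ∃ k : Nat, 1 ≤ k ∧ k < ls.length ∧ PySem.Chars.join [x] (ls.drop k) = a) := by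
  intro ls
  induction ls with
  | nil => intro h; exact absurd rfl h
  | cons p ls' ih =>
    intro _ hfree
    cases ls' with
    | nil =>
      rw [PySem.Chars.join_singleton]
      constructor
      · intro h
        exact absurd (h.mem (by simp)) (hfree p (by simp))
      · rintro ⟨k, hk1, hk2, -⟩
        simp at hk2; omega
    | cons q t =>
      rw [PySem.Chars.join_cons_cons]
      have hJ : p ++ [x] ++ PySem.Chars.join [x] (q :: t)
          = p ++ (x :: PySem.Chars.join [x] (q :: t)) := by simp
      rw [hJ]
      have ihq := ih (by simp) (fun r hr => hfree r (by simp [hr]))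
      constructor
      · intro h
        rcases suffix_append_cases p _ _ h with h1 | ⟨u, hu, hup, heq⟩
        · rcases List.suffix_cons_iff.mp h1 with h2 | h3
          · refine ⟨1, le_refl 1, by simp, ?_⟩
            simpa using (List.cons.injEq .. ▸ h2).2.symm
          · rcases ihq.mp h3 with ⟨k, hk1, hk2, hk3⟩
            exact ⟨k + 1, by omega, by simp at hk2 ⊢; omega, by simpa using hk3⟩
        · cases u with
          | nil => exact absurd rfl hu
          | cons c u' =>
            have hcx : c = x := by
              have := heq
              simp at this
              exact this.1.symm
            exact absurd (hup.mem (by simp [hcx])) (hfree p (by simp))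
      · rintro ⟨k, hk1, hk2, hk3⟩
        cases k with
        | zero => omega
        | succ k' =>
          cases k' with
          | zero =>
            simp only [List.drop_succ_cons, List.drop_zero] at hk3
            rw [← hk3]
            exact List.suffix_append _ _
          | succ m =>
            have : (x :: a) <:+ PySem.Chars.join [x] (q :: t) := by
              apply ihq.mpr
              refine ⟨m + 1, by omega, ?_, ?_⟩
              · simp at hk2 ⊢; omega
              · simpa using hk3
            exact (this.trans (List.suffix_cons x _)).trans (List.suffix_append _ _)

-- ===== VERDICT (by name: the statement is the Claim_ definition above) =====
theorem is_domain_allowed_spec : Claim_equal_is_domain_allowed := by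
  intro domain allow_set _
  unfold Spec_is_domain_allowed is_domain_allowed is_domain_allowed_alt
  set N : List Char :=
    ((PySem.Chars.lower domain.toList).reverse.dropWhile (· == '.')).reverse with hNdef
  by_cases h0 : N = []
  · simp [h0]
  · simp only [if_neg h0]
    rw [pySplitOn_singleton]
    have hne : N.splitOn '.' ≠ [] := List.splitOnP_ne_nil _ N
    have hjoin : PySem.Chars.join ['.'] (N.splitOn '.') = N :=
      List.intercalate_splitOn N '.'
    have hfree := not_mem_of_mem_splitOn '.' N
    rw [Bool.eq_iff_iff]
    have hsuf : ∀ a : List Char, (('.' :: a) <:+ N ↔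
        ∃ k : Nat, 1 ≤ k ∧ k < (N.splitOn '.').length ∧
          PySem.Chars.join ['.'] ((N.splitOn '.').drop k) = a) := by
      intro a
      conv_lhs => rw [← hjoin]
      exact suffix_join_iff '.' a _ hne hfree
    by_cases hmem : (allow_set.map String.toList).contains N = true
    · simp only [if_pos hmem]
      simp only [true_iff, List.any_eq_true]
      rcases List.mem_map.mp (List.contains_iff_mem.mp hmem) with ⟨s, hs, hsl⟩
      exact ⟨s, hs, by simp [hsl]⟩
    · simp only [if_neg hmem]
      simp only [List.any_eq_true, List.contains_iff_mem]
      constructor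
      · rintro ⟨i, hi, hcont⟩
        have hi' := PySem.List.mem_pyRange_one.mp hi
        have hk : i = ((i.toNat : Nat) : Int) := by omega
        rw [hk, PySem.List.slice_from_natCast] at hcont
        rcases List.mem_map.mp hcont with ⟨s, hs, hsl⟩
        refine ⟨s, hs, ?_⟩
        apply Bool.or_eq_true_iff.mpr
        right
        rw [PySem.Chars.endswith_iff]
        apply (hsuf s.toList).mpr
        exact ⟨i.toNat, by omega, by omega, hsl.symm⟩
      · rintro ⟨s, hs, hcond⟩
        rcases Bool.or_eq_true_iff.mp hcond with h | h
        · exfalso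
          apply hmem
          apply List.contains_iff_mem.mpr
          exact List.mem_map.mpr ⟨s, hs, (beq_iff_eq.mp h).symm⟩
        · rcases (hsuf s.toList).mp (PySem.Chars.endswith_iff _ _ |>.mp h) with ⟨k, hk1, hk2, hk3⟩
          refine ⟨(k : Int), PySem.List.mem_pyRange_one.mpr ⟨by omega, by simp at hk2 ⊢; omega⟩, ?_⟩
          rw [PySem.List.slice_from_natCast (a := k)]
          exact List.mem_map.mpr ⟨s, hs, hk3.symm⟩
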